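-- pv_equiv track=rewrite | github.com/Enhso/metac-bot-template | contradictory_information_analyzer.py | _parse_coherence_result
-- ===== SOURCE A (Python) =====
-- from typing import Optional, Callable, List, Dict, Any
--
-- def _parse_coherence_result(coherence_result: str) -> Dict[str, str]:
--     """Parse the coherence assessment result."""
--     assessment = {
--         'coherence': 'Medium',  # Default
--         'confidence_impact': 'Moderate impact on confidence due to some contradictions found.'  # Default
--     }
--
--     lines = coherence_result.split('\n')
--
--     for line in lines:
--         line = line.strip()
--         if line.startswith('**Overall Coherence Level**'):
--             # Extract coherence level from next line or same line
--             coherence_text = line.replace('**Overall Coherence Level**', '').strip()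
--             if coherence_text:
--                 if 'High' in coherence_text:
--                     assessment['coherence'] = 'High'
--                 elif 'Low' in coherence_text:
--                     assessment['coherence'] = 'Low'
--                 else:
--                     assessment['coherence'] = 'Medium'
--         elif line.startswith('**Confidence Impact**'):
--             # Look for the confidence impact in following lines
--             impact_text = line.replace('**Confidence Impact**', '').strip()
--             if impact_text:
--                 assessment['confidence_impact'] = impact_text
--
--     return assessment
-- ===== SOURCE B (Python) =====
-- def _last_value(lines, marker):
--     """Scan the lines back to front; return the first (i.e. overall last)
--     non-empty extracted text for the given marker, or None."""
--     for line in reversed(lines):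
--         s = line.strip()
--         if s.startswith(marker):
--             t = s.replace(marker, '').strip()
--             if t:
--                 return t
--     return None
--
--
-- def _parse_coherence_result(coherence_result: str):
--     """Parse the coherence assessment result."""
--     lines = coherence_result.split('\n')
--     c = _last_value(lines, '**Overall Coherence Level**')
--     if c is None:
--         coherence = 'Medium'
--     elif 'High' in c:
--         coherence = 'High'
--     elif 'Low' in c:
--         coherence = 'Low'
--     else:
--         coherence = 'Medium'
--     impact = _last_value(lines, '**Confidence Impact**') \
--         or 'Moderate impact on confidence due to some contradictions found.'
--     return {'coherence': coherence, 'confidence_impact': impact}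
-- ===== Notes on version B (the rewrite author's own statement) =====
-- stated objective: simpler
-- what changed: Replaces the single forward stateful loop that keeps mutating a dict with two independent back-to-front scans that early-return the last non-empty value per marker, classifying the coherence level once at the end.
import Mathlib
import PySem

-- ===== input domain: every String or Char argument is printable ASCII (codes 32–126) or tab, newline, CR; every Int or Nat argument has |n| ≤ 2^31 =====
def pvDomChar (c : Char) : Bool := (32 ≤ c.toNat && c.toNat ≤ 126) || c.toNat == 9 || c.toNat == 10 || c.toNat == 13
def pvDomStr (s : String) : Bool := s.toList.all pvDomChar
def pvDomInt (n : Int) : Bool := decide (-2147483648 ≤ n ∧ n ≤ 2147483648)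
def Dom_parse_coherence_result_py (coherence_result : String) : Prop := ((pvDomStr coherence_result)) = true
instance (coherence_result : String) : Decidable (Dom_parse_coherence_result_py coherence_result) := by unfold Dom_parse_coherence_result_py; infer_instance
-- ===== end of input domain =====

-- B replaces A's single forward loop that mutates a dict by two independent
-- back-to-front scans that early-return the last non-empty value per marker (simpler decomposition).

-- ===== PORT A =====
-- the body of A's for-loop, acting on the dict `assessment`
def pvStepA (d : PySem.Dict String String) (line : String) : PySem.Dict String String :=
  let line := PySem.Str.strip line
  if PySem.Str.startswith line "**Overall Coherence Level**" then
    let coherence_text := PySem.Str.strip (PySem.Str.replace line "**Overall Coherence Level**" "")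
    if coherence_text ≠ "" then
      if PySem.Str.isIn "High" coherence_text then d.insert "coherence" "High"
      else if PySem.Str.isIn "Low" coherence_text then d.insert "coherence" "Low"
      else d.insert "coherence" "Medium"
    else d
  else if PySem.Str.startswith line "**Confidence Impact**" then
    let impact_text := PySem.Str.strip (PySem.Str.replace line "**Confidence Impact**" "")
    if impact_text ≠ "" then d.insert "confidence_impact" impact_text
    else d
  else d

def parse_coherence_result_py (coherence_result : String) : List (String × String) :=
  let assessment : PySem.Dict String String :=
    ((PySem.Dict.empty.insert "coherence" "Medium").insert "confidence_impact"
      "Moderate impact on confidence due to some contradictions found.")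
  let lines := (PySem.Str.split? coherence_result "\n").getD []   -- sep is the non-empty "\n", so split? is never none
  (lines.foldl pvStepA assessment).items

-- ===== PORT B =====
-- port of Source B's _last_value: first match on the reversed line list, early return
def pvLastValue (marker : String) : List String → Option String
  | [] => none
  | l :: rest =>
    let s := PySem.Str.strip l
    if PySem.Str.startswith s marker then
      let t := PySem.Str.strip (PySem.Str.replace s marker "")
      if t ≠ "" then some t else pvLastValue marker rest
    else pvLastValue marker rest

def parse_coherence_result_py_alt (coherence_result : String) : List (String × String) :=
  let lines := (PySem.Str.split? coherence_result "\n").getD []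
  let rlines := lines.reverse
  let coherence :=
    match pvLastValue "**Overall Coherence Level**" rlines with
    | none => "Medium"
    | some c =>
      if PySem.Str.isIn "High" c then "High"
      else if PySem.Str.isIn "Low" c then "Low"
      else "Medium"
  let impact := (pvLastValue "**Confidence Impact**" rlines).getD
      "Moderate impact on confidence due to some contradictions found."
  [("coherence", coherence), ("confidence_impact", impact)]

-- ===== PRECONDITION & SPEC =====
def Spec_parse_coherence_result_py (coherence_result : String) (out : List (String × String)) : Prop := out = parse_coherence_result_py_alt coherence_result
instance (coherence_result : String) (out : List (String × String)) : Decidable (Spec_parse_coherence_result_py coherence_result out) := by unfold Spec_parse_coherence_result_py; infer_instance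

-- ===== CLAIM (what is proved, stated in full; the proofs are below) =====
def Claim_equal_parse_coherence_result_py : Prop := ∀ (coherence_result : String), Dom_parse_coherence_result_py coherence_result → Spec_parse_coherence_result_py coherence_result (parse_coherence_result_py coherence_result)

-- ===== LEMMAS AND PROOFS =====

def pvMkDict (c i : String) : PySem.Dict String String :=
  PySem.Dict.mk [("coherence", c), ("confidence_impact", i)]

def pvClassify (t : String) : String :=
  if PySem.Str.isIn "High" t then "High"
  else if PySem.Str.isIn "Low" t then "Low"
  else "Medium"

-- what one line contributes for a given marker
def pvMatch1 (marker l : String) : Option String :=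
  let s := PySem.Str.strip l
  if PySem.Str.startswith s marker then
    let t := PySem.Str.strip (PySem.Str.replace s marker "")
    if t ≠ "" then some t else none
  else none

lemma pvElim_elim {α β : Type} (o p : Option α) (c : β) (g : α → β) :
    (o.elim p some).elim c g = o.elim (p.elim c g) g := by
  cases o <;> rfl

lemma pvLastValue_append (m : String) (xs ys : List String) :
    pvLastValue m (xs ++ ys) = (pvLastValue m xs).elim (pvLastValue m ys) some := by
  induction xs with
  | nil => rfl
  | cons x xs ih =>
    simp only [List.cons_append, pvLastValue]
    split_ifs <;> simp [ih]

lemma pvLastValue_singleton (m l : String) :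
    pvLastValue m [l] = pvMatch1 m l := by
  simp only [pvLastValue, pvMatch1]

lemma not_both_markers (s : String)
    (h : PySem.Str.startswith s "**Overall Coherence Level**" = true) :
    PySem.Str.startswith s "**Confidence Impact**" = false := by
  by_contra hc
  rw [Bool.not_eq_false] at hc
  rw [PySem.Str.startswith_eq, PySem.Chars.startswith_iff] at h hc
  rcases List.prefix_or_prefix_of_prefix h hc with h' | h' <;> revert h' <;> decide

lemma insert_coherence (c i v : String) :
    (pvMkDict c i).insert "coherence" v = pvMkDict v i := by
  simp [pvMkDict, PySem.Dict.insert, PySem.Dict.contains]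

lemma insert_impact (c i v : String) :
    (pvMkDict c i).insert "confidence_impact" v = pvMkDict c v := by
  simp [pvMkDict, PySem.Dict.insert, PySem.Dict.contains]

lemma stepA_mk (c i l : String) :
    pvStepA (pvMkDict c i) l
      = pvMkDict ((pvMatch1 "**Overall Coherence Level**" l).elim c pvClassify)
                 ((pvMatch1 "**Confidence Impact**" l).elim i id) := by
  unfold pvStepA pvMatch1
  by_cases h1 : PySem.Str.startswith (PySem.Str.strip l) "**Overall Coherence Level**" = true
  · have h2 := not_both_markers _ h1
    simp only [h1, h2, if_true, Bool.false_eq_true, if_false]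
    by_cases hne : PySem.Str.strip (PySem.Str.replace (PySem.Str.strip l) "**Overall Coherence Level**" "") = ""
    · simp [hne]
    · simp only [ne_eq, hne, not_false_eq_true, if_true, Option.elim_some]
      unfold pvClassify
      split_ifs <;> simp [insert_coherence]
  · rw [Bool.not_eq_true] at h1
    by_cases h2 : PySem.Str.startswith (PySem.Str.strip l) "**Confidence Impact**" = true
    · simp only [h1, Bool.false_eq_true, if_false, h2, if_true]
      by_cases hne : PySem.Str.strip (PySem.Str.replace (PySem.Str.strip l) "**Confidence Impact**" "") = ""
      · simp [hne]
      · simp only [ne_eq, hne, not_false_eq_true, if_true, Option.elim_some, id]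
        exact insert_impact _ _ _
    · rw [Bool.not_eq_true] at h2
      simp only [h1, h2, Bool.false_eq_true, if_false, Option.elim_none]

lemma foldA_eq (lines : List String) : ∀ (c i : String),
    lines.foldl pvStepA (pvMkDict c i)
      = pvMkDict ((pvLastValue "**Overall Coherence Level**" lines.reverse).elim c pvClassify)
                 ((pvLastValue "**Confidence Impact**" lines.reverse).elim i id) := by
  induction lines with
  | nil => intro c i; simp [pvLastValue]
  | cons l ls ih =>
    intro c i
    rw [List.foldl_cons, stepA_mk, ih, List.reverse_cons,
        pvLastValue_append, pvLastValue_append,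
        pvLastValue_singleton, pvLastValue_singleton, pvElim_elim, pvElim_elim]

-- ===== VERDICT (by name: the statement is the Claim_ definition above) =====
theorem parse_coherence_result_py_spec : Claim_equal_parse_coherence_result_py := by
  intro s _
  show (List.foldl pvStepA
      (pvMkDict "Medium" "Moderate impact on confidence due to some contradictions found.")
      ((PySem.Str.split? s "\n").getD [])).items = parse_coherence_result_py_alt s
  rw [foldA_eq]
  unfold parse_coherence_result_py_alt
  rcases hC : pvLastValue "**Overall Coherence Level**" ((PySem.Str.split? s "\n").getD []).reverse with _ | t <;>
    rcases hI : pvLastValue "**Confidence Impact**" ((PySem.Str.split? s "\n").getD []).reverse with _ | u <;>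
      simp only [hC, hI, Option.elim_none, Option.elim_some, Option.getD_none, Option.getD_some,
        pvMkDict, pvClassify, id]
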